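-- pv_equiv track=rewrite | github.com/AbdelrahmanSaadIdress/Teaching-Assistant | models/SummarizationGeneration/SGGraphs/SGgraph.py | _parse_rewriter_output
-- ===== SOURCE A (Python) =====
-- def _parse_rewriter_output(raw: str) -> dict:
--     """Parse the ===SECTION=== delimited rewriter output."""
--     sections = {
--         "key_terms": "",
--         "tldr": "",
--         "structured_notes": "",
--         "paragraph_summary": "",
--     }
--     markers = {
--         "===KEY_TERMS===": "key_terms",
--         "===TLDR===": "tldr",
--         "===STRUCTURED_NOTES===": "structured_notes",
--         "===PARAGRAPH_SUMMARY===": "paragraph_summary",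
--     }
--     current_key = None
--     lines = raw.split("\n")
--     buffer = []
--
--     for line in lines:
--         stripped = line.strip()
--         if stripped in markers:
--             if current_key and buffer:
--                 sections[current_key] = "\n".join(buffer).strip()
--             current_key = markers[stripped]
--             buffer = []
--         else:
--             if current_key:
--                 buffer.append(line)
--
--     # flush last section
--     if current_key and buffer:
--         sections[current_key] = "\n".join(buffer).strip()
--
--     return sections
-- ===== SOURCE B (Python) =====
-- def _parse_rewriter_output(raw: str) -> dict:
--     sections = {
--         "key_terms": "",
--         "tldr": "",
--         "structured_notes": "",
--         "paragraph_summary": "",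
--     }
--     markers = {
--         "===KEY_TERMS===": "key_terms",
--         "===TLDR===": "tldr",
--         "===STRUCTURED_NOTES===": "structured_notes",
--         "===PARAGRAPH_SUMMARY===": "paragraph_summary",
--     }
--
--     def split_at_marker(lines):
--         """Split lines into (prefix before first marker line, rest from that marker)."""
--         for i, l in enumerate(lines):
--             if l.strip() in markers:
--                 return lines[:i], lines[i:]
--         return lines, []
--
--     _, rest = split_at_marker(raw.split("\n"))
--     while rest:
--         head, rest = rest[0], rest[1:]
--         body, rest = split_at_marker(rest)
--         if body:
--             sections[markers[head.strip()]] = "\n".join(body).strip()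
--     return sections
-- ===== Notes on version B (the rewrite author's own statement) =====
-- stated objective: alternative
-- what changed: Replaces A's line-by-line state machine (current_key/buffer accumulation with flushes) by a segment decomposition: locate the first marker line, then repeatedly slice off one marker and its whole inter-marker block, writing each non-empty block directly.
import Mathlib
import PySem

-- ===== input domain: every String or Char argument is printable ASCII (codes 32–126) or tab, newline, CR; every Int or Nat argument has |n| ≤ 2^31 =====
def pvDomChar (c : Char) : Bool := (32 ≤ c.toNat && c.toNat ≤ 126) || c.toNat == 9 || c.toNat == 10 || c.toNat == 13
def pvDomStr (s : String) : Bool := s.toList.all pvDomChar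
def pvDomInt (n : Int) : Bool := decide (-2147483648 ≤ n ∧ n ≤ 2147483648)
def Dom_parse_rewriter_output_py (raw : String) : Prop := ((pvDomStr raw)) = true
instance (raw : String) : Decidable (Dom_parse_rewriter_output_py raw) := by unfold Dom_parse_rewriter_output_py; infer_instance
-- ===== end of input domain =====

-- B replaces A's line-by-line state machine (current_key / buffer) by a segment
-- decomposition: locate each marker line and slice out the whole inter-marker block
-- at once (objective: alternative, same cost).

-- literal data both Pythons write out
def pvMarkers : PySem.Dict String String := PySem.Dict.ofList
  [("===KEY_TERMS===", "key_terms"), ("===TLDR===", "tldr"),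
   ("===STRUCTURED_NOTES===", "structured_notes"), ("===PARAGRAPH_SUMMARY===", "paragraph_summary")]

def pvInit : PySem.Dict String String := PySem.Dict.ofList
  [("key_terms", ""), ("tldr", ""), ("structured_notes", ""), ("paragraph_summary", "")]

-- ===== PORT A =====
-- 'stripped in markers'
def pvIsMarkerStr (s : String) : Bool := PySem.Dict.contains pvMarkers s

-- one iteration of A's for-loop over the state (sections, current_key, buffer)
def pvStep (s : PySem.Dict String String × Option String × List String) (line : String) :
    PySem.Dict String String × Option String × List String :=
  let stripped := PySem.Str.strip line
  if pvIsMarkerStr stripped then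
    let d' := match s.2.1 with
      | some k => if s.2.2 ≠ [] then PySem.Dict.insert s.1 k (PySem.Str.strip (PySem.Str.join "\n" s.2.2)) else s.1
      | none => s.1
    (d', some (PySem.Dict.getD pvMarkers stripped ""), ([] : List String))
  else
    match s.2.1 with
    | some _ => (s.1, s.2.1, s.2.2 ++ [line])
    | none => s

-- the trailing 'if current_key and buffer' flush
def pvFinish (s : PySem.Dict String String × Option String × List String) : PySem.Dict String String :=
  match s.2.1 with
  | some k => if s.2.2 ≠ [] then PySem.Dict.insert s.1 k (PySem.Str.strip (PySem.Str.join "\n" s.2.2)) else s.1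
  | none => s.1

def parse_rewriter_output_py (raw : String) : List (String × String) :=
  let lines := (PySem.Str.split? raw "\n").getD []
  (pvFinish (lines.foldl pvStep (pvInit, none, []))).items

-- ===== PORT B =====
-- B's split_at_marker: (prefix before the first marker line, rest starting at it)
def pvIsMarkerLine (l : String) : Bool := pvIsMarkerStr (PySem.Str.strip l)

def pvSplitAtMarker (lines : List String) : List String × List String :=
  (lines.takeWhile (fun l => !pvIsMarkerLine l), lines.dropWhile (fun l => !pvIsMarkerLine l))

-- B's while-loop: consume one marker line and its whole body segment per round
def pvGo : PySem.Dict String String → List String → PySem.Dict String String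
  | d, [] => d
  | d, head :: rest =>
    let p := pvSplitAtMarker rest
    pvGo (if p.1 ≠ [] then
            PySem.Dict.insert d (PySem.Dict.getD pvMarkers (PySem.Str.strip head) "")
              (PySem.Str.strip (PySem.Str.join "\n" p.1))
          else d) p.2
termination_by _ ls => ls.length
decreasing_by
  simp only [pvSplitAtMarker]
  exact Nat.lt_succ_of_le (List.length_dropWhile_le _ _)

def parse_rewriter_output_py_alt (raw : String) : List (String × String) :=
  (pvGo pvInit (pvSplitAtMarker ((PySem.Str.split? raw "\n").getD [])).2).items

-- ===== PRECONDITION & SPEC =====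
def Spec_parse_rewriter_output_py (raw : String) (out : List (String × String)) : Prop := out = parse_rewriter_output_py_alt raw
instance (raw : String) (out : List (String × String)) : Decidable (Spec_parse_rewriter_output_py raw out) := by unfold Spec_parse_rewriter_output_py; infer_instance

-- ===== CLAIM (what is proved, stated in full; the proofs are below) =====
def Claim_equal_parse_rewriter_output_py : Prop := ∀ (raw : String), Dom_parse_rewriter_output_py raw → Spec_parse_rewriter_output_py raw (parse_rewriter_output_py raw)

-- ===== LEMMAS AND PROOFS =====

-- A's loop resumed just after a marker (current key k, pending buffer buf) equals B's
-- segment step: flush buf extended by the next whole non-marker block, then continue.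
theorem pv_seg (lines : List String) : ∀ (d : PySem.Dict String String) (k : String) (buf : List String),
    pvFinish (lines.foldl pvStep (d, some k, buf))
    = pvGo (if buf ++ lines.takeWhile (fun l => !pvIsMarkerLine l) ≠ [] then
              PySem.Dict.insert d k
                (PySem.Str.strip (PySem.Str.join "\n" (buf ++ lines.takeWhile (fun l => !pvIsMarkerLine l))))
            else d)
        (lines.dropWhile (fun l => !pvIsMarkerLine l)) := by
  induction lines with
  | nil =>
    intro d k buf
    simp [pvFinish, pvGo]
  | cons l rest ih =>
    intro d k buf
    by_cases hm : pvIsMarkerLine l = true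
    · have hstep : pvStep (d, some k, buf) l
          = ((if buf ≠ [] then PySem.Dict.insert d k (PySem.Str.strip (PySem.Str.join "\n" buf)) else d),
             some (PySem.Dict.getD pvMarkers (PySem.Str.strip l) ""), ([] : List String)) := by
        simp only [pvStep]
        rw [if_pos (by simpa [pvIsMarkerLine] using hm)]
      rw [List.foldl_cons, hstep, ih]
      rw [List.takeWhile_cons_of_neg (by simp [hm]), List.dropWhile_cons_of_neg (by simp [hm])]
      rw [pvGo]
      simp [pvSplitAtMarker]
    · have hm' : pvIsMarkerStr (PySem.Str.strip l) = false := by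
        simpa [pvIsMarkerLine] using hm
      have hstep : pvStep (d, some k, buf) l = (d, some k, buf ++ [l]) := by
        simp only [pvStep]
        rw [if_neg (by simp [hm'])]
      rw [List.foldl_cons, hstep, ih]
      rw [List.takeWhile_cons_of_pos (by simp [pvIsMarkerLine, hm']),
          List.dropWhile_cons_of_pos (by simp [pvIsMarkerLine, hm'])]
      simp

-- A's loop before any marker was seen leaves everything untouched up to the first marker.
theorem pv_pre (lines : List String) : ∀ (d : PySem.Dict String String) (buf : List String),
    pvFinish (lines.foldl pvStep (d, none, buf))
    = pvGo d (lines.dropWhile (fun l => !pvIsMarkerLine l)) := by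
  induction lines with
  | nil =>
    intro d buf
    simp [pvFinish, pvGo]
  | cons l rest ih =>
    intro d buf
    by_cases hm : pvIsMarkerLine l = true
    · have hstep : pvStep (d, none, buf) l
          = (d, some (PySem.Dict.getD pvMarkers (PySem.Str.strip l) ""), ([] : List String)) := by
        simp only [pvStep]
        rw [if_pos (by simpa [pvIsMarkerLine] using hm)]
      rw [List.foldl_cons, hstep, pv_seg]
      rw [List.dropWhile_cons_of_neg (by simp [hm])]
      rw [pvGo]
      simp [pvSplitAtMarker]
    · have hm' : pvIsMarkerStr (PySem.Str.strip l) = false := by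
        simpa [pvIsMarkerLine] using hm
      have hstep : pvStep (d, none, buf) l = (d, none, buf) := by
        simp only [pvStep]
        rw [if_neg (by simp [hm'])]
      rw [List.foldl_cons, hstep, ih]
      rw [List.dropWhile_cons_of_pos (by simp [pvIsMarkerLine, hm'])]

-- ===== VERDICT (by name: the statement is the Claim_ definition above) =====
theorem parse_rewriter_output_py_spec : Claim_equal_parse_rewriter_output_py := by
  intro raw _
  exact congrArg PySem.Dict.items (pv_pre ((PySem.Str.split? raw "\n").getD []) pvInit [])
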